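-- pv_equiv track=rewrite | github.com/ChanghyunRyu/Python-CodingTest-note | recursion_func/vowel_dictionary/vowel_dictionary_review.py | solution
-- ===== SOURCE A (Python) =====
-- def solution(word):
--     dictionary = {'A': 0, 'E': 1, 'I': 2, 'O': 3, 'U': 4}
--     answer = 0
--     for i in range(len(word)):
--         answer += 1
--         temp = 0
--         for j in range(5-i):
--             temp += 5**j
--         answer += dictionary[word[i]]*temp
--     return answer
-- ===== SOURCE B (Python) =====
-- def solution(word):
--     dictionary = {'A': 0, 'E': 1, 'I': 2, 'O': 3, 'U': 4}
--     return sum(1 + dictionary[c] * ((5 ** max(0, 5 - i) - 1) // 4)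
--                for i, c in enumerate(word))
-- ===== Notes on version B (the rewrite author's own statement) =====
-- stated objective: simpler
-- what changed: Replaced A's inner geometric-series loop with the closed form (5**max(0,5-i)-1)//4 and the outer accumulator loop with a single sum over enumerate(word).
import Mathlib
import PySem

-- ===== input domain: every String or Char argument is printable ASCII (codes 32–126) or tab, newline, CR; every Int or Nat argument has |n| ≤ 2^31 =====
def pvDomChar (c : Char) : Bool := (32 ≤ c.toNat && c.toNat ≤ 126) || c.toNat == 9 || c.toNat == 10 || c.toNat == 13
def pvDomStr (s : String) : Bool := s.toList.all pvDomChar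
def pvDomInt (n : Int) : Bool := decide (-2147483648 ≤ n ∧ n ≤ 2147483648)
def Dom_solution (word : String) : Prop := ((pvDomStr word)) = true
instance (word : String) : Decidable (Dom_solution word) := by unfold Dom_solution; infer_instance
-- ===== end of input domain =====

-- B replaces A's inner geometric-sum loop by the closed form (5^max(0,5-i) - 1) // 4 and
-- folds the whole computation into a single sum over enumerate(word) (objective: simpler).

-- ===== PORT A =====
-- Literal port of A. Python's dictionary[word[i]] raises KeyError on a non-vowel character;
-- those inputs are excluded by Pre_solution below, so the getD default 0 is never reached
-- inside Pre_. word[i] is always in range (i < len(word)), so pyGetD's default is unreachable.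
-- 5**j with j ≥ 0 (from range) is ported as 5 ^ j.toNat.
def solution (word : String) : Int :=
  let dictionary : PySem.Dict Char Int := PySem.Dict.ofList [('A', (0:Int)), ('E', 1), ('I', 2), ('O', 3), ('U', 4)]
  (PySem.List.pyRange 0 (word.toList.length) 1).foldl
    (fun answer i =>
      let answer := answer + 1
      let temp := (PySem.List.pyRange 0 (5 - i) 1).foldl (fun temp j => temp + 5 ^ j.toNat) 0
      answer + dictionary.getD (PySem.List.pyGetD word.toList i ' ') 0 * temp)
    0

-- ===== PORT B =====
-- Port of Source B: sum(1 + dictionary[c] * ((5 ** max(0, 5 - i) - 1) // 4) for i, c in enumerate(word)).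
-- Same KeyError domain as A (excluded by Pre_solution; getD default 0 unreachable inside Pre_).
def solution_alt (word : String) : Int :=
  let dictionary : PySem.Dict Char Int := PySem.Dict.ofList [('A', (0:Int)), ('E', 1), ('I', 2), ('O', 3), ('U', 4)]
  ((PySem.List.enumerate word.toList 0).map
    (fun p => 1 + dictionary.getD p.2 0 *
      PySem.Int.floordiv (5 ^ (max 0 (5 - p.1)).toNat - 1) 4)).sum

-- ===== PRECONDITION & SPEC =====
-- Pre_ excludes words containing a non-vowel character: there both Pythons raise KeyError.
def Pre_solution (word : String) : Prop :=
  word.toList.all (fun c => c = 'A' ∨ c = 'E' ∨ c = 'I' ∨ c = 'O' ∨ c = 'U')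
instance (word : String) : Decidable (Pre_solution word) := by unfold Pre_solution; infer_instance

def pvWitness_solution : String := "UOIEA"

def Spec_solution (word : String) (out : Int) : Prop := out = solution_alt word
instance (word : String) (out : Int) : Decidable (Spec_solution word out) := by unfold Spec_solution; infer_instance

-- ===== CLAIM (what is proved, stated in full; the proofs are below) =====
def Claim_equal_solution : Prop := ∀ (word : String), Dom_solution word → Pre_solution word → Spec_solution word (solution word)

-- ===== LEMMAS AND PROOFS =====

-- xs[k] for k ≥ 1 skips the head
theorem pyGetD_cons_pos {α : Type} (x : α) (t : List α) (k : Int) (hk : 1 ≤ k) (d : α) :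
    PySem.List.pyGetD (x :: t) k d = PySem.List.pyGetD t (k - 1) d := by
  simp only [PySem.List.pyGetD, PySem.List.pyGet?, PySem.List.pyIdx?, List.length_cons]
  split_ifs with h1 h2 h3 h4 h5 h6 <;> first
  | omega
  | (simp only [Option.bind_some, Option.bind_none, Option.getD_none]
     try (have hT : k.toNat = (k - 1).toNat + 1 := by omega
          rw [hT, List.getElem?_cons_succ]))

-- an index loop reading xs[i - s] is the enumerate loop
theorem map_pyRange_enum {α β : Type} (d : α) (f : Int → α → β) :
    ∀ (xs : List α) (s : Int), 0 ≤ s →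
    (PySem.List.pyRange s (s + xs.length) 1).map
        (fun i => f i (PySem.List.pyGetD xs (i - s) d)) =
      (PySem.List.enumerate xs s).map (fun p => f p.1 p.2) := by
  intro xs
  induction xs with
  | nil => intro s hs; simp [PySem.List.pyRange_one_eq_nil, PySem.List.enumerate_nil]
  | cons x t ih =>
    intro s hs
    rw [PySem.List.enumerate_cons]
    rw [PySem.List.pyRange_one_cons (by simp only [List.length_cons]; push_cast; omega)]
    simp only [List.map_cons, List.length_cons]
    congr 1
    · simp [PySem.List.pyGetD_zero_cons]
    · push_cast
      have h1 : s + ((t.length : Int) + 1) = (s + 1) + t.length := by ring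
      rw [h1, ← ih (s + 1) (by omega)]
      apply List.map_congr_left
      intro i hi
      rw [PySem.List.mem_pyRange_one] at hi
      rw [pyGetD_cons_pos _ _ _ (by omega)]
      have h2 : i - s - 1 = i - (s + 1) := by ring
      rw [h2]

-- A's inner loop equals B's closed form, for every index the outer loop produces
theorem temp_eq_weight (i : Int) (hi : 0 ≤ i) :
    (PySem.List.pyRange 0 (5 - i) 1).foldl (fun temp j => temp + 5 ^ j.toNat) 0 =
      PySem.Int.floordiv (5 ^ (max 0 (5 - i)).toNat - 1) 4 := by
  rcases (by omega : i = 0 ∨ i = 1 ∨ i = 2 ∨ i = 3 ∨ i = 4 ∨ 5 ≤ i) with h | h | h | h | h | h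
  · subst h; decide
  · subst h; decide
  · subst h; decide
  · subst h; decide
  · subst h; decide
  · rw [PySem.List.pyRange_one_eq_nil (by omega)]
    have hm : max 0 (5 - i) = 0 := by omega
    rw [hm]
    decide

-- indices produced by enumerate xs 0 are nonnegative
theorem enum_fst_nonneg {α : Type} (xs : List α) (p : Int × α)
    (hp : p ∈ PySem.List.enumerate xs 0) : 0 ≤ p.1 := by
  have h := List.mem_map_of_mem (f := Prod.fst) hp
  rw [PySem.List.map_fst_enumerate] at h
  rw [PySem.List.mem_pyRange_one] at h
  exact h.1

-- ===== VERDICT (by name: the statement is the Claim_ definition above) =====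
theorem solution_spec : Claim_equal_solution := by
  intro word _ _
  unfold Spec_solution solution solution_alt
  set dict : PySem.Dict Char Int := PySem.Dict.ofList [('A', 0), ('E', 1), ('I', 2), ('O', 3), ('U', 4)] with hdict
  have hbody : (fun (answer : Int) (i : Int) =>
        answer + 1 + dict.getD (PySem.List.pyGetD word.toList i ' ') 0 *
          (PySem.List.pyRange 0 (5 - i) 1).foldl (fun temp j => temp + 5 ^ j.toNat) 0)
      = fun answer i => answer +
          (1 + dict.getD (PySem.List.pyGetD word.toList i ' ') 0 *
            (PySem.List.pyRange 0 (5 - i) 1).foldl (fun temp j => temp + 5 ^ j.toNat) 0) := by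
    funext a i; ring
  simp only []
  rw [hbody, PySem.List.foldl_add, zero_add]
  have h0 : (0 : Int) + (word.toList.length : Int) = (word.toList.length : Int) := by ring
  rw [← h0]
  have hmap := map_pyRange_enum (β := Int) ' '
    (fun i c => 1 + dict.getD c 0 *
      (PySem.List.pyRange 0 (5 - i) 1).foldl (fun temp j => temp + 5 ^ j.toNat) 0)
    word.toList 0 (le_refl 0)
  simp only [sub_zero] at hmap
  rw [hmap]
  congr 1
  apply List.map_congr_left
  intro p hp
  rw [temp_eq_weight p.1 (enum_fst_nonneg word.toList p hp)]
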